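-- pv_equiv track=rewrite | github.com/Camty1/advent_of_code_2024 | 7/main.py | sum_valid_equations
-- ===== SOURCE A (Python) =====
-- def sum_valid_equations(values: list[tuple[int, list[int]]]) -> int:
--     running_sum = 0
--     for solution, sequence in values:
--         possible_combinations = 2 ** (len(sequence) - 1)
--         for i in range(possible_combinations):
--             maybe_solution = sequence[0]
--             operators = f"{i:0{len(sequence)-1}b}"
--             for j, operator in enumerate(operators):
--                 # plus
--                 if operator == '0':
--                     maybe_solution += sequence[j + 1]
--                 else:
--                     maybe_solution *= sequence[j + 1]
--
--             if maybe_solution == solution: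
--                 running_sum += solution
--                 break
--
--     return running_sum
-- ===== SOURCE B (Python) =====
-- def sum_valid_equations(values: list[tuple[int, list[int]]]) -> int:
--     total = 0
--     for solution, sequence in values:
--         first = sequence[0]
--         rest = sequence[1:]
--
--         def feasible(t: int, k: int) -> bool:
--             # can +/* inserted left-to-right through first, rest[:k] produce t?
--             if k == 0:
--                 return t == first
--             x = rest[k - 1]
--             if feasible(t - x, k - 1):
--                 return True
--             if x == 0:
--                 return t == 0  # a * 0 == 0 for every reachable a; some value is always reachable
--             return t % x == 0 and feasible(t // x, k - 1)
--
--         if feasible(solution, len(rest)):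
--             total += solution
--     return total
-- ===== Notes on version B (the rewrite author's own statement) =====
-- stated objective: faster
-- what changed: Per equation, B recurses backward from the target (undo the last operator: always subtract, divide only when the last number divides the target), instead of A's enumeration of all 2^(n-1) operator bitstrings via string formatting with a full left-to-right re-evaluation for each.
-- outside the precondition, e.g. on sum_valid_equations([(5, [])]): A raises TypeError, B raises IndexError
-- crash fix: On inputs whose sequences are all nonempty but at least one is a singleton, A raises IndexError (sequence[j+1]); B returns the sum of the achieved targets. — e.g. on sum_valid_equations([(5, [5])]): A raises IndexError, B returns 5
import Mathlib
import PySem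

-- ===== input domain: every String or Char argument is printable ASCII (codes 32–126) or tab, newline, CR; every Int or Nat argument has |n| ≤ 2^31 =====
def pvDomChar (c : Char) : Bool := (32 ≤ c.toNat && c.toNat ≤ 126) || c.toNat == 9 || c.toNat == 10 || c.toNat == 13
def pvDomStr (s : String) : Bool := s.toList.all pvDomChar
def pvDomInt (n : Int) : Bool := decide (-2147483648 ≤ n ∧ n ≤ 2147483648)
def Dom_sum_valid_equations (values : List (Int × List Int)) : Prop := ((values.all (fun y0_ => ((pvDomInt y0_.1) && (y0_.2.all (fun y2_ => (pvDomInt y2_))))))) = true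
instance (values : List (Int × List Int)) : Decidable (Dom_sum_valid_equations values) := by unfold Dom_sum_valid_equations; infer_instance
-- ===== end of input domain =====

-- B replaces A's enumeration of all 2^(n-1) operator bitstrings by a backward recursion from the target (subtract always, divide only on divisibility); same return value.

-- ===== PORT A =====
-- f"{i:0{w}b}" as a list of chars; exact for i < 2 ^ w, the only values the port reaches (i runs over range(2 ^ w))
def pvBinChar (i k : Nat) : Char := if i.testBit k then '1' else '0'
def pvFmtBin (i w : Nat) : List Char := (List.range w).reverse.map (pvBinChar i)

-- the inner 'for j, operator in enumerate(operators)' loop over maybe_solution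
def pvApplyOps (seq : List Int) : Int → Nat → List Char → Int
  | acc, _, [] => acc
  | acc, j, c :: ops =>
      pvApplyOps seq
        (if c = '0' then acc + (PySem.List.pyGet? seq ((j : Int) + 1)).getD 0
         else acc * (PySem.List.pyGet? seq ((j : Int) + 1)).getD 0)
        (j + 1) ops

-- 'for i in range(possible_combinations): …; if maybe_solution == solution: running_sum += solution; break'
def pvTryEq (solution : Int) (seq : List Int) : Int :=
  let w := seq.length - 1
  match (List.range (2 ^ w)).find?
      (fun i => pvApplyOps seq ((PySem.List.pyGet? seq 0).getD 0) 0 (pvFmtBin i w) == solution) with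
  | some _ => solution
  | none => 0

def sum_valid_equations (values : List (Int × List Int)) : Int :=
  values.foldl (fun acc p => acc + pvTryEq p.1 p.2) 0

-- ===== PORT B =====
-- feasible(t, k): can +/* inserted left-to-right through first, rest[:k] produce t?
-- (works backward from the target: subtract always, divide only on divisibility)
def altFeasible (first : Int) (rest : List Int) : Int → Nat → Bool
  | t, 0 => t == first
  | t, k + 1 =>
      let x := (PySem.List.pyGet? rest (((k + 1 : Nat) : Int) - 1)).getD 0
      if altFeasible first rest (t - x) k then true
      else if x == 0 then t == 0
      else PySem.Int.mod t x == 0 && altFeasible first rest (PySem.Int.floordiv t x) k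

def altTryEq (solution : Int) (seq : List Int) : Int :=
  let first := (PySem.List.pyGet? seq 0).getD 0
  let rest := PySem.List.slice seq (some 1) none
  if altFeasible first rest solution rest.length then solution else 0

def sum_valid_equations_alt (values : List (Int × List Int)) : Int :=
  values.foldl (fun acc p => acc + altTryEq p.1 p.2) 0

-- ===== PRECONDITION & SPEC =====
-- Python A raises on any equation whose sequence has fewer than 2 numbers
-- (TypeError from 2 ** -1 on an empty one, IndexError from sequence[j + 1] on a singleton).
def Pre_sum_valid_equations (values : List (Int × List Int)) : Prop :=
  ∀ p ∈ values, 2 ≤ p.2.length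
instance (values : List (Int × List Int)) : Decidable (Pre_sum_valid_equations values) := by unfold Pre_sum_valid_equations; infer_instance
def pvWitness_sum_valid_equations : (List (Int × List Int)) := [(3, [1, 2])]

-- On inputs whose sequences are all nonempty but some sequence is a singleton, A raises IndexError while B returns
-- the sum of the achieved targets (checked by sum_valid_equations_raises at the bottom of the file).
def Raises_sum_valid_equations (values : List (Int × List Int)) : Prop :=
  (∀ p ∈ values, p.2 ≠ []) ∧ (∃ p ∈ values, p.2.length = 1)
instance (values : List (Int × List Int)) : Decidable (Raises_sum_valid_equations values) := by unfold Raises_sum_valid_equations; infer_instance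
def pvRaiseWitness_sum_valid_equations : (List (Int × List Int)) := [(5, [5])]
def pvRaiseWitnessOut_sum_valid_equations : Int := 5

def Spec_sum_valid_equations (values : List (Int × List Int)) (out : Int) : Prop := out = sum_valid_equations_alt values
instance (values : List (Int × List Int)) (out : Int) : Decidable (Spec_sum_valid_equations values out) := by unfold Spec_sum_valid_equations; infer_instance

-- ===== CLAIM (what is proved, stated in full; the proofs are below) =====
def Claim_equal_sum_valid_equations : Prop := ∀ (values : List (Int × List Int)), Dom_sum_valid_equations values → Pre_sum_valid_equations values → Spec_sum_valid_equations values (sum_valid_equations values)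
def Claim_raises_sum_valid_equations : Prop := (∀ (values : List (Int × List Int)), Dom_sum_valid_equations values → Raises_sum_valid_equations values → ¬ Pre_sum_valid_equations values) ∧ (Dom_sum_valid_equations (pvRaiseWitness_sum_valid_equations) ∧ Raises_sum_valid_equations (pvRaiseWitness_sum_valid_equations) ∧ sum_valid_equations_alt (pvRaiseWitness_sum_valid_equations) = pvRaiseWitnessOut_sum_valid_equations)

-- ===== LEMMAS AND PROOFS =====

-- left-to-right evaluation of one operator string over the tail of the sequence
def evalR : Int → List Int → List Char → Int
  | a, _, [] => a
  | a, [], _ :: _ => a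
  | a, x :: xs, c :: ops => evalR (if c = '0' then a + x else a * x) xs ops

-- r is reachable from a by inserting + / * left to right through xs
def Reach : Int → List Int → Int → Prop
  | a, [], r => r = a
  | a, x :: xs, r => Reach (a + x) xs r ∨ Reach (a * x) xs r

theorem pvApplyOps_eq_evalR (seq : List Int) (ops : List Char) :
    ∀ (a : Int) (j : Nat), j + 1 + ops.length ≤ seq.length →
    pvApplyOps seq a j ops = evalR a (seq.drop (j + 1)) ops := by
  induction ops with
  | nil => intro a j _; cases seq.drop (j + 1) <;> rfl
  | cons c rest ih =>
      intro a j h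
      have hj : j + 1 < seq.length := by simp at h; omega
      have hdrop : seq.drop (j + 1) = seq[j + 1] :: seq.drop (j + 1 + 1) :=
        List.drop_eq_getElem_cons hj
      have hget : PySem.List.pyGet? seq ((j : Int) + 1) = some seq[j + 1] := by
        have : ((j : Int) + 1) = ((j + 1 : Nat) : Int) := by push_cast; ring
        rw [this, PySem.List.pyGet?_natCast, List.getElem?_eq_getElem hj]
      rw [hdrop]
      show pvApplyOps seq _ j (c :: rest) = evalR _ _ (c :: rest)
      simp only [pvApplyOps, evalR, hget, Option.getD_some]
      exact ih _ (j + 1) (by simp at h ⊢; omega)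

theorem pvFmtBin_succ (i w : Nat) :
    pvFmtBin i (w + 1) = pvBinChar i w :: pvFmtBin (i % 2 ^ w) w := by
  simp only [pvFmtBin, List.range_succ, List.reverse_append, List.reverse_cons,
    List.reverse_nil, List.nil_append, List.cons_append, List.map_cons]
  refine congrArg _ (List.map_congr_left ?_)
  intro k hk
  have hk' : k < w := by simpa using List.mem_range.mp (List.mem_reverse.mp hk)
  simp [pvBinChar, Nat.testBit_mod_two_pow, hk']

theorem length_pvFmtBin (i w : Nat) : (pvFmtBin i w).length = w := by
  simp [pvFmtBin]

theorem reach_iff_exists_bin (xs : List Int) :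
    ∀ (a r : Int), Reach a xs r ↔
      ∃ i < 2 ^ xs.length, evalR a xs (pvFmtBin i xs.length) = r := by
  induction xs with
  | nil =>
      intro a r
      constructor
      · intro h; exact ⟨0, by norm_num, by simpa [pvFmtBin, evalR, Reach] using h.symm⟩
      · rintro ⟨i, _, h⟩; simpa [pvFmtBin, evalR, Reach] using h.symm
  | cons x xs ih =>
      intro a r
      have hpow : 0 < 2 ^ xs.length := Nat.two_pow_pos xs.length
      constructor
      · rintro (h | h)
        · obtain ⟨j, hj, hj2⟩ := (ih (a + x) r).mp h
          refine ⟨j, by rw [List.length_cons, pow_succ]; omega, ?_⟩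
          have hbit : j.testBit xs.length = false := Nat.testBit_lt_two_pow hj
          rw [show (x :: xs).length = xs.length + 1 by simp, pvFmtBin_succ,
            Nat.mod_eq_of_lt hj]
          simpa [evalR, pvBinChar, hbit] using hj2
        · obtain ⟨j, hj, hj2⟩ := (ih (a * x) r).mp h
          refine ⟨j + 2 ^ xs.length, by rw [List.length_cons, pow_succ]; omega, ?_⟩
          have hbit : (j + 2 ^ xs.length).testBit xs.length = true := by
            rw [Nat.add_comm, Nat.testBit_two_pow_add_eq,
              Nat.testBit_lt_two_pow hj]
            rfl
          rw [show (x :: xs).length = xs.length + 1 by simp, pvFmtBin_succ,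
            Nat.add_mod_right, Nat.mod_eq_of_lt hj]
          simpa [evalR, pvBinChar, hbit] using hj2
      · rintro ⟨i, hi, h⟩
        rw [show (x :: xs).length = xs.length + 1 by simp, pvFmtBin_succ] at h
        have hj : i % 2 ^ xs.length < 2 ^ xs.length := Nat.mod_lt _ hpow
        cases hbit : i.testBit xs.length with
        | false =>
            left
            exact (ih (a + x) r).mpr ⟨i % 2 ^ xs.length, hj, by
              simpa [evalR, pvBinChar, hbit] using h⟩
        | true =>
            right
            exact (ih (a * x) r).mpr ⟨i % 2 ^ xs.length, hj, by
              simpa [evalR, pvBinChar, hbit] using h⟩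

theorem Reach_nonempty (xs : List Int) : ∀ a : Int, ∃ m, Reach a xs m := by
  induction xs with
  | nil => intro a; exact ⟨a, rfl⟩
  | cons x xs ih => intro a; obtain ⟨m, hm⟩ := ih (a + x); exact ⟨m, Or.inl hm⟩

theorem Reach_append_singleton (xs : List Int) (x : Int) :
    ∀ a r : Int, Reach a (xs ++ [x]) r ↔
      Reach a xs (r - x) ∨ ∃ m, Reach a xs m ∧ m * x = r := by
  induction xs with
  | nil =>
      intro a r
      simp only [List.nil_append, Reach]
      constructor
      · rintro (h | h)
        · left; omega
        · right; exact ⟨a, rfl, h.symm⟩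
      · rintro (h | ⟨m, rfl, h⟩)
        · left; omega
        · right; exact h.symm
  | cons y ys ih =>
      intro a r
      simp only [List.cons_append, Reach]
      rw [ih, ih]
      constructor
      · rintro ((h | ⟨m, hm, hx⟩) | (h | ⟨m, hm, hx⟩))
        · exact Or.inl (Or.inl h)
        · exact Or.inr ⟨m, Or.inl hm, hx⟩
        · exact Or.inl (Or.inr h)
        · exact Or.inr ⟨m, Or.inr hm, hx⟩
      · rintro ((h | h) | ⟨m, hm | hm, hx⟩)
        · exact Or.inl (Or.inl h)
        · exact Or.inr (Or.inl h)
        · exact Or.inl (Or.inr ⟨m, hm, hx⟩)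
        · exact Or.inr (Or.inr ⟨m, hm, hx⟩)

theorem mul_reach_iff (a : Int) (xs : List Int) (x r : Int) (hx : x ≠ 0) :
    (∃ m, Reach a xs m ∧ m * x = r) ↔
      (PySem.Int.mod r x = 0 ∧ Reach a xs (PySem.Int.floordiv r x)) := by
  constructor
  · rintro ⟨m, hm, rfl⟩
    have hmod : PySem.Int.mod (m * x) x = 0 :=
      (PySem.Int.mod_eq_zero_iff_dvd _ _).mpr ⟨m, mul_comm m x⟩
    refine ⟨hmod, ?_⟩
    have hid := PySem.Int.floordiv_mul_add_mod (m * x) x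
    rw [hmod, add_zero] at hid
    rw [mul_right_cancel₀ hx hid]
    exact hm
  · rintro ⟨hmod, hre⟩
    refine ⟨PySem.Int.floordiv r x, hre, ?_⟩
    have hid := PySem.Int.floordiv_mul_add_mod r x
    rw [hmod, add_zero] at hid
    exact hid

theorem altFeasible_iff (first : Int) (rest : List Int) :
    ∀ (k : Nat), k ≤ rest.length → ∀ t : Int,
      (altFeasible first rest t k = true ↔ Reach first (rest.take k) t) := by
  intro k
  induction k with
  | zero => intro _ t; simp [altFeasible, Reach]
  | succ k ih =>
      intro hk t
      have hklt : k < rest.length := by omega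
      have ih' := ih (Nat.le_of_lt hklt)
      have hx : (PySem.List.pyGet? rest (((k + 1 : Nat) : Int) - 1)).getD 0 = rest[k] := by
        have h1 : ((k + 1 : Nat) : Int) - 1 = ((k : Nat) : Int) := by push_cast; ring
        rw [h1, PySem.List.pyGet?_natCast, List.getElem?_eq_getElem hklt]; rfl
      have htake : rest.take (k + 1) = rest.take k ++ [rest[k]] := by
        rw [List.take_add_one, List.getElem?_eq_getElem hklt]; rfl
      rw [htake, Reach_append_singleton]
      show (let x := (PySem.List.pyGet? rest (((k + 1 : Nat) : Int) - 1)).getD 0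
            if altFeasible first rest (t - x) k then true
            else if x == 0 then t == 0
            else PySem.Int.mod t x == 0 &&
              altFeasible first rest (PySem.Int.floordiv t x) k) = true ↔ _
      simp only [hx]
      by_cases h1 : altFeasible first rest (t - rest[k]) k
      · rw [if_pos h1]
        constructor
        · intro _; exact Or.inl ((ih' _).mp h1)
        · intro _; rfl
      · rw [if_neg h1]
        have hnl : ¬ Reach first (rest.take k) (t - rest[k]) :=
          fun hr => h1 ((ih' _).mpr hr)
        by_cases h0 : rest[k] = (0 : Int)
        · rw [if_pos (beq_iff_eq.mpr h0)]
          rw [beq_iff_eq]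
          constructor
          · intro ht
            obtain ⟨m, hm⟩ := Reach_nonempty (rest.take k) first
            exact Or.inr ⟨m, hm, by rw [h0, mul_zero, ht]⟩
          · rintro (h | ⟨m, _, hmx⟩)
            · exact absurd h hnl
            · rw [h0, mul_zero] at hmx; exact hmx.symm
        · rw [if_neg (by simpa using h0)]
          rw [Bool.and_eq_true, beq_iff_eq, ih']
          rw [mul_reach_iff first (rest.take k) rest[k] t h0]
          constructor
          · exact fun h => Or.inr h
          · rintro (h | h)
            · exact absurd h hnl
            · exact h

theorem tryEq_eq (solution : Int) (seq : List Int) :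
    pvTryEq solution seq = altTryEq solution seq := by
  cases seq with
  | nil =>
      by_cases h : solution = 0
      · subst h; decide
      · simp [pvTryEq, altTryEq, altFeasible, pvFmtBin, pvApplyOps,
          PySem.List.pyGet?, PySem.List.slice, Ne.symm h, h]
  | cons y t =>
      have hAdef : pvTryEq solution (y :: t) =
          (match (List.range (2 ^ ((y :: t).length - 1))).find?
              (fun i => pvApplyOps (y :: t) ((PySem.List.pyGet? (y :: t) 0).getD 0) 0
                (pvFmtBin i ((y :: t).length - 1)) == solution) with
            | some _ => solution
            | none => 0) := rfl
      have hlen : (y :: t).length - 1 = t.length := by simp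
      have hget0 : (PySem.List.pyGet? (y :: t) 0).getD 0 = y := by
        rw [PySem.List.pyGet?_zero_cons]; rfl
      have hAc : ∀ i : Nat,
          pvApplyOps (y :: t) ((PySem.List.pyGet? (y :: t) 0).getD 0) 0
            (pvFmtBin i ((y :: t).length - 1)) = evalR y t (pvFmtBin i t.length) := by
        intro i
        rw [hlen, hget0, pvApplyOps_eq_evalR (y :: t) _ y 0
          (by rw [length_pvFmtBin]; simp; omega)]
        rfl
      haveI : Decidable (Reach y t solution) := Classical.dec _
      have hA : pvTryEq solution (y :: t) =
          if Reach y t solution then solution else 0 := by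
        rw [hAdef]
        cases hfind : List.find?
            (fun i => pvApplyOps (y :: t) ((PySem.List.pyGet? (y :: t) 0).getD 0) 0
              (pvFmtBin i ((y :: t).length - 1)) == solution)
            (List.range (2 ^ ((y :: t).length - 1))) with
        | some i0 =>
            have hp := List.find?_some hfind
            have hm := List.mem_of_find?_eq_some hfind
            have hR : Reach y t solution := (reach_iff_exists_bin t y solution).mpr
              ⟨i0, by simpa [hlen] using List.mem_range.mp hm, by
                have hv := beq_iff_eq.mp hp
                rw [hAc i0] at hv
                exact hv⟩
            rw [if_pos hR]
        | none =>
            have hR : ¬ Reach y t solution := by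
              intro hR
              obtain ⟨i, hi, hv⟩ := (reach_iff_exists_bin t y solution).mp hR
              exact List.find?_eq_none.mp hfind i
                (List.mem_range.mpr (by simpa [hlen] using hi))
                (beq_iff_eq.mpr ((hAc i).trans hv))
            rw [if_neg hR]
      have hBdef : altTryEq solution (y :: t) =
          if altFeasible ((PySem.List.pyGet? (y :: t) 0).getD 0)
              (PySem.List.slice (y :: t) (some 1) none) solution
              (PySem.List.slice (y :: t) (some 1) none).length
          then solution else 0 := rfl
      have hsl : PySem.List.slice (y :: t) (some 1) none = t := by
        rw [PySem.List.slice_from_one]; rfl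
      have hB : altTryEq solution (y :: t) =
          if Reach y t solution then solution else 0 := by
        rw [hBdef, hsl, hget0]
        have hiff := altFeasible_iff y t t.length le_rfl solution
        rw [List.take_length] at hiff
        by_cases hR : Reach y t solution
        · rw [if_pos (hiff.mpr hR), if_pos hR]
        · rw [if_neg (fun hc => hR (hiff.mp hc)), if_neg hR]
      rw [hA, hB]

-- ===== VERDICT (by name: the statement is the Claim_ definition above) =====
theorem sum_valid_equations_spec : Claim_equal_sum_valid_equations := by
  intro values _ _
  unfold Spec_sum_valid_equations sum_valid_equations sum_valid_equations_alt
  congr 1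
  funext acc p
  rw [tryEq_eq]

theorem sum_valid_equations_raises : Claim_raises_sum_valid_equations := by
  unfold Claim_raises_sum_valid_equations
  constructor
  · rintro values _ ⟨_, p, hp, hlen⟩ hpre
    have := hpre p hp
    omega
  · exact ⟨by decide, by decide, by decide⟩

-- self-check: the raise witness really lies outside Pre_sum_valid_equations
theorem sum_valid_equations_raises_witness_ok :
    ¬ Pre_sum_valid_equations pvRaiseWitness_sum_valid_equations :=
  sum_valid_equations_raises.1 pvRaiseWitness_sum_valid_equations (by decide)
    sum_valid_equations_raises.2.2.1
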